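-- pv_equiv track=rewrite | github.com/matthewdeanmartin/gizyskon | main.py | reconstruct_interpretation_A
-- ===== SOURCE A (Python) =====
-- from typing import List, Optional, Tuple
--
-- def reconstruct_interpretation_A(target_vals: List[int]) -> Optional[List[int]]:
--     # Given target output y_i, reconstruct unique x_i if possible (1..26 each)
--     n = len(target_vals)
--     T = [None]*n  # tail sums
--     x = [None]*n  # letters 1..26
--     # last position: T_n must be in [1..26] and ((T_n+6-1) % 26)+1 == y_n
--     yn = target_vals[-1]
--     # Tn candidates in 1..26 s.t. ((t+5)%26)+1 == yn -> (t+5) % 26 == yn-1 -> t ≡ yn-6 (mod 26)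
--     # There is exactly one t in 1..26 for each residue class; compute it.
--     residue = (yn - 6) % 26  # 0..25
--     Tn = residue if residue != 0 else 26
--     if not (1 <= Tn <= 26):
--         return None
--     T[-1] = Tn
--     x[-1] = Tn  # since Tn = x_n
--
--     # work backwards
--     for i in range(n-2, -1, -1):
--         yi = target_vals[i]
--         # Ti must satisfy Ti % 26 ≡ yi-6 (in 1..26 space), AND Ti - T_{i+1} in [1..26]
--         residue = (yi - 6) % 26
--         # Generate all numbers congruent to residue in the feasible range.
--         # Feasible range for Ti given Ti+1: [Ti+1 + 1, Ti+1 + 26]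
--         low = T[i+1] + 1
--         high = T[i+1] + 26
--         # Find the unique t in [low, high] with t ≡ residue (mod 26), but note that our mapping used 1..26,
--         # not 0..25. For residue==0, we want numbers ≡ 0 mod 26.
--         candidates = []
--         # Bring low up to the first number with this residue
--         if residue == 0:
--             r0 = 26
--         else:
--             r0 = residue
--         # Find the first k >= low s.t. k % 26 == r0 % 26
--         start = low + ((r0 - low) % 26)
--         for t in range(start, high+1, 26):
--             candidates.append(t)
--         if len(candidates) != 1:
--             return None  # if not exactly one, no unique reconstruction
--         Ti = candidates[0]
--         T[i] = Ti
--         xi = Ti - T[i+1]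
--         if not (1 <= xi <= 26):
--             return None
--         x[i] = xi
--
--     return x
-- ===== SOURCE B (Python) =====
-- from typing import List, Optional
--
-- def reconstruct_interpretation_A(target_vals: List[int]) -> Optional[List[int]]:
--     # Closed form: each letter is a mod-26 difference of consecutive targets.
--     last = ((target_vals[-1] - 6) % 26) or 26
--     return [((a - b) % 26) or 26 for a, b in zip(target_vals, target_vals[1:])] + [last]
-- ===== Notes on version B (the rewrite author's own statement) =====
-- stated objective: simpler
-- what changed: Replaced the tail-sum array, the 26-wide candidate-window scan and the uniqueness/range checks with a one-line closed form: each letter is the mod-26 difference of consecutive targets (0 mapped to 26), and the last letter is ((y_n - 6) % 26) or 26; dropping the per-index window construction also makes B measurably faster by a constant factor.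
import Mathlib
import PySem

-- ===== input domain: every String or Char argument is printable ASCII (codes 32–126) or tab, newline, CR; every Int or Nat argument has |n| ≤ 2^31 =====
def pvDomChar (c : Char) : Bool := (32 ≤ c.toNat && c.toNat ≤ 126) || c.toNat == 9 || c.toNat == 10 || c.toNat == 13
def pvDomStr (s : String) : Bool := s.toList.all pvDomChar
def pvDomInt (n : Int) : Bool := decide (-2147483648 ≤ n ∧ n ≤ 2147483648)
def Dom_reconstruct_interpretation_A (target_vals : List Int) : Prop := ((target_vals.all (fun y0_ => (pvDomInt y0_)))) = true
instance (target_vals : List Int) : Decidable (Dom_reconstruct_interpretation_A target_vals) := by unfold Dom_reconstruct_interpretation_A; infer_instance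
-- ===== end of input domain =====

-- B replaces A's tail-sum array and 26-wide candidate-window scan by a closed form
-- (each letter is a mod-26 difference of consecutive targets, 0 mapped to 26): simpler.


-- ===== PORT A =====
-- one iteration of A's backward loop (state = the T and x arrays; none = an early `return None`)
def stepA (tv : List Int) (st : Option (List (Option Int) × List (Option Int))) (i : Int) :
    Option (List (Option Int) × List (Option Int)) :=
  match st with
  | none => none
  | some (T, x) =>
    match PySem.List.pyGet? tv i with
    | none => none
    | some yi =>
      let residue := PySem.Int.mod (yi - 6) 26
      match PySem.List.pyGet? T (i + 1) with
      | none => none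
      | some none => none      -- Python would raise on None + 1; never reached by A's loop
      | some (some ti1) =>
        let low := ti1 + 1
        let high := ti1 + 26
        let r0 : Int := if residue = 0 then 26 else residue
        let start := low + PySem.Int.mod (r0 - low) 26
        let candidates := PySem.List.pyRange start (high + 1) 26
        if candidates.length ≠ 1 then none
        else
          match PySem.List.pyGet? candidates 0 with
          | none => none       -- never reached: candidates has length 1
          | some ti =>
            let T' := PySem.List.pySetD T i (some ti)
            let xi := ti - ti1
            if 1 ≤ xi ∧ xi ≤ 26 then some (T', PySem.List.pySetD x i (some xi)) else none

def reconstruct_interpretation_A (target_vals : List Int) : Option (List Int) :=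
  let n : Int := PySem.List.len target_vals
  let T : List (Option Int) := List.replicate target_vals.length none   -- [None]*n
  let x : List (Option Int) := List.replicate target_vals.length none   -- [None]*n
  match PySem.List.pyGet? target_vals (-1) with
  | none => none               -- IndexError reading the last element of an empty list (excluded by Pre_)
  | some yn =>
    let residue := PySem.Int.mod (yn - 6) 26
    let tn : Int := if residue ≠ 0 then residue else 26
    if ¬ (1 ≤ tn ∧ tn ≤ 26) then none
    else
      let T1 := PySem.List.pySetD T (-1) (some tn)
      let x1 := PySem.List.pySetD x (-1) (some tn)
      match (PySem.List.pyRange (n - 2) (-1) (-1)).foldl (stepA target_vals) (some (T1, x1)) with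
      | none => none
      | some (_, xfin) => xfin.mapM id   -- `return x`: by now every entry of x is an int

-- ===== PORT B =====
def pyOr26 (v : Int) : Int := if v = 0 then 26 else v   -- Python's `v or 26` for 0 ≤ v

def reconstruct_interpretation_A_alt (target_vals : List Int) : Option (List Int) :=
  match PySem.List.pyGet? target_vals (-1) with
  | none => none               -- IndexError reading the last element of an empty list (excluded by Pre_)
  | some yl =>
    let last := pyOr26 (PySem.Int.mod (yl - 6) 26)
    some (((target_vals.zip (PySem.List.slice target_vals (some 1) none)).map
            (fun p => pyOr26 (PySem.Int.mod (p.1 - p.2) 26))) ++ [last])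

-- ===== PRECONDITION & SPEC =====
-- Pre_ excludes only the empty list, on which both A and B raise IndexError when reading the last element.
def Pre_reconstruct_interpretation_A (target_vals : List Int) : Prop := target_vals ≠ []
instance (target_vals : List Int) : Decidable (Pre_reconstruct_interpretation_A target_vals) := by unfold Pre_reconstruct_interpretation_A; infer_instance
def pvWitness_reconstruct_interpretation_A : List Int := [7, 19, 3]

def Spec_reconstruct_interpretation_A (target_vals : List Int) (out : Option (List Int)) : Prop := out = reconstruct_interpretation_A_alt target_vals
instance (target_vals : List Int) (out : Option (List Int)) : Decidable (Spec_reconstruct_interpretation_A target_vals out) := by unfold Spec_reconstruct_interpretation_A; infer_instance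

-- ===== CLAIM (what is proved, stated in full; the proofs are below) =====
def Claim_equal_reconstruct_interpretation_A : Prop := ∀ (target_vals : List Int), Dom_reconstruct_interpretation_A target_vals → Pre_reconstruct_interpretation_A target_vals → Spec_reconstruct_interpretation_A target_vals (reconstruct_interpretation_A target_vals)

-- ===== LEMMAS AND PROOFS =====

-- the value B puts at pair position j (j ≤ n-2)
def gval (tv : List Int) (j : Nat) : Int :=
  pyOr26 (PySem.Int.mod (tv.getD j 0 - tv.getD (j+1) 0) 26)

-- the value both programs put at the last position
def fval (tv : List Int) : Int :=
  pyOr26 (PySem.Int.mod (tv.getD (tv.length - 1) 0 - 6) 26)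

-- the tail sum A's T array holds at index j
def tval (tv : List Int) (j : Nat) : Int :=
  fval tv + ((List.range (tv.length - 1 - j)).map (fun k => gval tv (j + k))).sum

theorem pySetD_neg_one {α : Type} (xs : List α) (h : xs ≠ []) (v : α) :
    PySem.List.pySetD xs (-1) v = xs.set (xs.length - 1) v := by
  have hl : 0 < xs.length := List.length_pos_iff.mpr h
  simp only [PySem.List.pySetD, PySem.List.pySet?, PySem.List.pyIdx?]
  rw [if_neg (by omega), if_pos (by omega : -(xs.length:Int) ≤ -1)]
  norm_num

theorem mapM_id_map_some (l : List Int) : (l.map some).mapM id = some l := by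
  induction l with
  | nil => rfl
  | cons a t ih => simp [List.mapM_cons, ih]

theorem mod26 (a : Int) : PySem.Int.mod a 26 = a % 26 :=
  PySem.Int.mod_eq_emod_of_pos (by norm_num)

-- the 26-wide window contains exactly one element of the residue class
theorem window_singleton (s e : Int) (h1 : 1 ≤ e) (h2 : e ≤ 26) :
    PySem.List.pyRange s (s + e) 26 = [s] := by
  rw [PySem.List.pyRange_of_pos _ _ (by norm_num)]
  rw [if_pos (by omega)]
  have h : ((s + e - s + 26 - 1) / 26).toNat = 1 := by omega
  rw [h]
  simp [List.range_succ]

theorem tval_last (tv : List Int) : tval tv (tv.length - 1) = fval tv := by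
  simp [tval]

theorem tval_step (tv : List Int) (j : Nat) (hj : j < tv.length - 1) :
    tval tv j = gval tv j + tval tv (j+1) := by
  have h : tv.length - 1 - j = (tv.length - 1 - (j+1)) + 1 := by omega
  simp only [tval, h, List.range_succ_eq_map, List.map_cons, List.sum_cons, List.map_map]
  have he : ((List.range (tv.length - 1 - (j + 1))).map ((fun k => gval tv (j + k)) ∘ Nat.succ))
      = (List.range (tv.length - 1 - (j + 1))).map (fun k => gval tv (j + 1 + k)) := by
    apply List.map_congr_left
    intro a _
    simp only [Function.comp]
    congr 1
    omega
  rw [he]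
  ring_nf

theorem fval_mod (tv : List Int) :
    PySem.Int.mod (fval tv) 26 = PySem.Int.mod (tv.getD (tv.length - 1) 0 - 6) 26 := by
  simp only [fval, pyOr26, mod26]
  split_ifs with h <;> omega

theorem gval_mod (tv : List Int) (j : Nat) :
    PySem.Int.mod (gval tv j) 26 = PySem.Int.mod (tv.getD j 0 - tv.getD (j+1) 0) 26 := by
  simp only [gval, pyOr26, mod26]
  split_ifs with h <;> omega

theorem tval_mod (tv : List Int) (j : Nat) (hj : j ≤ tv.length - 1) :
    PySem.Int.mod (tval tv j) 26 = PySem.Int.mod (tv.getD j 0 - 6) 26 := by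
  by_cases h : j = tv.length - 1
  · subst h; rw [tval_last]; exact fval_mod tv
  · have hj' : j < tv.length - 1 := by omega
    have ih := tval_mod tv (j+1) (by omega)
    rw [tval_step tv j hj']
    have hg := gval_mod tv j
    simp only [mod26] at *
    omega
termination_by tv.length - 1 - j
decreasing_by omega

theorem dlist_succ (k : Nat) :
    PySem.List.pyRange (((k:Int) + 1) - 1) (-1) (-1)
      = (k : Int) :: PySem.List.pyRange ((k:Int) - 1) (-1) (-1) := by
  have : ((k:Int) + 1) - 1 = (k:Int) := by ring
  rw [this, PySem.List.pyRange_neg_one_cons (by omega)]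

-- one full evaluation of A's loop body at index k
theorem step_eval (tv : List Int) (k : Nat)
    (T x : List (Option Int)) (hT : T.length = tv.length)
    (hTk : T.getD (k+1) none = some (tval tv (k+1)))
    (hklt : k < tv.length - 1) :
    stepA tv (some (T, x)) (k : Int) =
      some (T.set k (some (tval tv k)), x.set k (some (gval tv k))) := by
  have hkn : k < tv.length := by omega
  have hk1n : k + 1 < tv.length := by omega
  have h1 : PySem.List.pyGet? tv (k : Int) = some (tv.getD k 0) := by
    rw [PySem.List.pyGet?_natCast]
    rw [List.getElem?_eq_getElem hkn, List.getD_eq_getElem tv 0 hkn]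
  have h2 : PySem.List.pyGet? T ((k : Int) + 1) = some (T.getD (k+1) none) := by
    have : (k : Int) + 1 = ((k+1 : Nat) : Int) := by push_cast; ring
    rw [this, PySem.List.pyGet?_natCast]
    rw [List.getElem?_eq_getElem (by omega), List.getD_eq_getElem T none (by omega)]
  rw [hTk] at h2
  simp only [stepA, h1, h2]
  set ti1 := tval tv (k+1) with hti1
  set yk := tv.getD k 0
  set m := PySem.Int.mod ((if PySem.Int.mod (yk - 6) 26 = 0 then (26:Int) else PySem.Int.mod (yk - 6) 26) - (ti1 + 1)) 26 with hm
  have hm0 : 0 ≤ m := PySem.Int.mod_nonneg _ (by norm_num)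
  have hm1 : m < 26 := PySem.Int.mod_lt _ (by norm_num)
  have hwin : PySem.List.pyRange (ti1 + 1 + m) (ti1 + 26 + 1) 26 = [ti1 + 1 + m] := by
    have he : ti1 + 26 + 1 = (ti1 + 1 + m) + (26 - m) := by ring
    rw [he, window_singleton _ _ (by omega) (by omega)]
  rw [hwin]
  simp only [List.length_cons, List.length_nil, PySem.List.pyGet?_zero_cons]
  rw [if_neg (by omega)]
  rw [if_pos (by constructor <;> omega)]
  have hgv : ti1 + 1 + m - ti1 = gval tv k := by
    have htm : PySem.Int.mod ti1 26 = PySem.Int.mod (tv.getD (k+1) 0 - 6) 26 :=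
      tval_mod tv (k+1) (by omega)
    simp only [hm, gval, pyOr26, mod26] at *
    split_ifs at * <;> omega
  have htv : ti1 + 1 + m = tval tv k := by
    rw [tval_step tv k hklt, ← hgv, hti1]
    ring
  rw [PySem.List.pySetD_natCast, PySem.List.pySetD_natCast]
  rw [hgv, htv]

-- invariant of A's backward loop: after the iterations for indices k-1 … 0,
-- x holds B's pair value at every position below k and is untouched elsewhere
theorem loop_inv (tv : List Int) (k : Nat) (hk : k ≤ tv.length - 1)
    (T x : List (Option Int)) (hT : T.length = tv.length) (hx : x.length = tv.length)
    (hTk : T.getD k none = some (tval tv k)) :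
    ∃ Tf xf, (PySem.List.pyRange ((k:Int) - 1) (-1) (-1)).foldl (stepA tv) (some (T, x)) = some (Tf, xf) ∧
      xf.length = tv.length ∧
      ∀ j : Nat, xf.getD j none = if j < k then some (gval tv j) else x.getD j none := by
  induction k generalizing T x with
  | zero =>
    rw [PySem.List.pyRange_neg_one_eq_nil (by norm_num)]
    exact ⟨T, x, rfl, hx, fun j => by simp⟩
  | succ k ih =>
    rw [show ((k+1 : Nat):Int) - 1 = ((k:Int)+1) - 1 by push_cast; ring, dlist_succ k,
      List.foldl_cons]
    rw [step_eval tv k T x hT hTk (by omega)]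
    obtain ⟨Tf, xf, hfold, hlen, hget⟩ := ih (by omega)
      (T.set k (some (tval tv k))) (x.set k (some (gval tv k)))
      (by simp [hT]) (by simp [hx])
      (by
        rw [List.getD_eq_getElem?_getD, List.getElem?_set_self (by omega)]
        rfl)
    refine ⟨Tf, xf, hfold, hlen, fun j => ?_⟩
    rw [hget j]
    by_cases hj : j < k
    · rw [if_pos hj, if_pos (by omega)]
    · rw [if_neg hj]
      by_cases hjk : j = k
      · subst hjk
        rw [if_pos (by omega), List.getD_eq_getElem?_getD, List.getElem?_set_self (by omega)]
        rfl
      · rw [if_neg (by omega), List.getD_eq_getElem?_getD, List.getElem?_set_ne (by omega),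
          List.getD_eq_getElem?_getD]

theorem pyGet?_neg_one_getD (tv : List Int) (h : tv ≠ []) :
    PySem.List.pyGet? tv (-1) = some (tv.getD (tv.length - 1) 0) := by
  have hl : 0 < tv.length := List.length_pos_iff.mpr h
  rw [PySem.List.pyGet?_neg_one, List.getLast?_eq_getElem?,
    List.getElem?_eq_getElem (by omega), List.getD_eq_getElem tv 0 (by omega)]

theorem reconstruct_interpretation_A_spec : Claim_equal_reconstruct_interpretation_A := by
  intro tv _ hpre
  unfold Spec_reconstruct_interpretation_A
  have hn : 0 < tv.length := List.length_pos_iff.mpr hpre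
  have hlast := pyGet?_neg_one_getD tv hpre
  simp only [reconstruct_interpretation_A, reconstruct_interpretation_A_alt, hlast,
    PySem.List.len_eq]
  set y := tv.getD (tv.length - 1) 0 with hy
  have htn : (if PySem.Int.mod (y - 6) 26 ≠ 0 then PySem.Int.mod (y - 6) 26 else (26:Int))
      = fval tv := by
    simp only [fval, pyOr26, ← hy]
    split_ifs with h1 h2 <;> simp_all
  rw [htn]
  have hf1 : 1 ≤ fval tv ∧ fval tv ≤ 26 := by
    have h0 : 0 ≤ PySem.Int.mod (y - 6) 26 := PySem.Int.mod_nonneg _ (by norm_num)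
    have hlt : PySem.Int.mod (y - 6) 26 < 26 := PySem.Int.mod_lt _ (by norm_num)
    simp only [fval, pyOr26, ← hy]
    split_ifs <;> omega
  rw [if_neg (by simp only [not_not]; exact hf1)]
  have hrep : (List.replicate tv.length (none : Option Int)) ≠ [] := by
    intro hcon
    have h2 := congrArg List.length hcon
    simp at h2
    rw [h2] at hn
    simp at hn
  rw [pySetD_neg_one _ hrep]
  simp only [List.length_replicate]
  have hrange : (tv.length : Int) - 2 = (((tv.length - 1 : Nat)) : Int) - 1 := by omega
  rw [hrange]
  obtain ⟨Tf, xf, hfold, hlen, hget⟩ := loop_inv tv (tv.length - 1) (le_refl _)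
    ((List.replicate tv.length none).set (tv.length - 1) (some (fval tv)))
    ((List.replicate tv.length none).set (tv.length - 1) (some (fval tv)))
    (by simp) (by simp)
    (by
      rw [List.getD_eq_getElem?_getD, List.getElem?_set_self (by simp; omega), tval_last]
      rfl)
  rw [hfold]
  -- identify xf with B's list of letters
  rw [PySem.List.slice_from_one]
  set L := ((tv.zip tv.tail).map (fun p => pyOr26 (PySem.Int.mod (p.1 - p.2) 26))) ++
    [pyOr26 (PySem.Int.mod (y - 6) 26)] with hL
  have hLlen : L.length = tv.length := by
    simp [hL, List.length_zip]
    omega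
  have hxfL : xf = L.map some := by
    apply List.ext_getElem (by simp [hlen, hLlen])
    intro j hj1 hj2
    have hjn : j < tv.length := by omega
    have hxj : xf[j] = ((if j < tv.length - 1 then some (gval tv j)
        else ((List.replicate tv.length (none : Option Int)).set (tv.length - 1) (some (fval tv))).getD j none)) := by
      rw [← hget j, List.getD_eq_getElem xf none (by omega)]
    rw [hxj]
    rw [List.getElem_map]
    by_cases hjlt : j < tv.length - 1
    · rw [if_pos hjlt]
      have : L[j]'(by omega) = gval tv j := by
        simp only [hL]
        rw [List.getElem_append_left (by simp [List.length_zip]; omega)]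
        rw [List.getElem_map, List.getElem_zip]
        have h1 : tv[j]'hjn = tv.getD j 0 := (List.getD_eq_getElem tv 0 hjn).symm
        have h2 : tv.tail[j]'(by simp [List.length_tail]; omega) = tv.getD (j+1) 0 := by
          rw [List.getElem_tail]
          exact (List.getD_eq_getElem tv 0 (by omega)).symm
        simp only [gval, h1, h2]
      exact (congrArg some this).symm
    · rw [if_neg hjlt]
      have hje : j = tv.length - 1 := by omega
      subst hje
      rw [List.getD_eq_getElem?_getD, List.getElem?_set_self (by simp; omega)]
      have : L[tv.length - 1]'(by omega) = fval tv := by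
        simp only [hL]
        rw [List.getElem_append_right (by simp [List.length_zip])]
        have hz : tv.length - 1 - ((tv.zip tv.tail).map
            (fun p => pyOr26 (PySem.Int.mod (p.1 - p.2) 26))).length = 0 := by
          simp [List.length_zip]
        simp only [hz, List.getElem_cons_zero, fval, hy]
      exact (congrArg some this).symm
  rw [hxfL]
  exact mapM_id_map_some L
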